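-- pv_equiv track=rewrite | github.com/tdda/tdda-book-examples | c5/wrap.py | split_line_before
-- ===== SOURCE A (Python) =====
-- def split_line_before(line, nth, sep=','):
--     i = 1
--     p = line.find(sep, 0)
--     while i < nth:
--         if p == -1:
--             break
--         i += 1
--         p = line.find(sep, p + 1)
--     if p == -1:
--         return line, ''
--     else:
--         return line[:p + 1], line[p+1:]
-- ===== SOURCE B (Python) =====
-- def split_line_before(line, nth, sep=','):
--     n = max(nth, 1)
--     pos = [i for i in range(len(line) - len(sep) + 1) if line[i:i+len(sep)] == sep]
--     if len(pos) < n: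
--         return line, ''
--     p = pos[n - 1]
--     return line[:p + 1], line[p + 1:]
-- ===== Notes on version B (the rewrite author's own statement) =====
-- stated objective: alternative
-- what changed: Replaces A's sequential find-next-separator while-loop by building the full list of (possibly overlapping) separator occurrence positions with one comprehension and indexing the nth one.
import Mathlib
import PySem

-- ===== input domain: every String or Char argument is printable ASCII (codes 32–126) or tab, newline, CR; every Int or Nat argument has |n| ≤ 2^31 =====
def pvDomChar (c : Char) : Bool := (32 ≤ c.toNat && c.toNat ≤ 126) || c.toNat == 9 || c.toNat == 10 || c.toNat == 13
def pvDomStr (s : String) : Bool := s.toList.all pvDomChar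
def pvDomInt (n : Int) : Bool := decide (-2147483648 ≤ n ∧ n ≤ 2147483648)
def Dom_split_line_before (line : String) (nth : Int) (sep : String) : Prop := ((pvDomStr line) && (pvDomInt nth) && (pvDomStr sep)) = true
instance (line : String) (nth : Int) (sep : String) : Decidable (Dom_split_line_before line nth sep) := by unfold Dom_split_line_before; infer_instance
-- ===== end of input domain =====

-- B replaces A's find-loop over separator positions by listing all (possibly overlapping)
-- occurrence positions in one comprehension and indexing the nth one (objective: alternative, same cost).

-- ===== PORT A =====
-- the while-loop of A: runs at most `fuel` more searches, stopping at -1 (i starts at 1, so fuel = (nth-1).toNat)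
def slbLoopA (L S : List Char) : Nat → Int → Int
  | 0, p => p
  | f+1, p => if p = -1 then p else slbLoopA L S f (PySem.Chars.findFrom L S (p+1))

def split_line_before (line : String) (nth : Int) (sep : String) : String × String :=
  let p := slbLoopA line.toList sep.toList (nth - 1).toNat
             (PySem.Chars.findFrom line.toList sep.toList 0)
  if p = -1 then (line, "")
  else (PySem.Str.slice line none (some (p + 1)), PySem.Str.slice line (some (p + 1)) none)

-- ===== PORT B =====
-- the comprehension of B: all positions i with line[i:i+len(sep)] == sep
def slbOcc (L S : List Char) : List Int :=
  (PySem.List.pyRange 0 ((L.length : Int) - (S.length : Int) + 1) 1).filter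
    (fun i => decide (PySem.Chars.slice L (some i) (some (i + (S.length : Int))) = S))

def split_line_before_alt (line : String) (nth : Int) (sep : String) : String × String :=
  let n : Int := max nth 1
  let pos := slbOcc line.toList sep.toList
  if (pos.length : Int) < n then (line, "")
  else
    let p := (PySem.List.pyGet? pos (n - 1)).getD (-1)
    (PySem.Str.slice line none (some (p + 1)), PySem.Str.slice line (some (p + 1)) none)

-- ===== PRECONDITION & SPEC =====
def Spec_split_line_before (line : String) (nth : Int) (sep : String) (out : String × String) : Prop := out = split_line_before_alt line nth sep
instance (line : String) (nth : Int) (sep : String) (out : String × String) : Decidable (Spec_split_line_before line nth sep out) := by unfold Spec_split_line_before; infer_instance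

-- ===== CLAIM (what is proved, stated in full; the proofs are below) =====
def Claim_equal_split_line_before : Prop := ∀ (line : String) (nth : Int) (sep : String), Dom_split_line_before line nth sep → Spec_split_line_before line nth sep (split_line_before line nth sep)

-- ===== LEMMAS AND PROOFS =====
-- membership characterisation of slbOcc
lemma mem_slbOcc {L S : List Char} {i : Int} :
    i ∈ slbOcc L S ↔ 0 ≤ i ∧ i + S.length ≤ L.length ∧ S <+: L.drop i.toNat := by
  unfold slbOcc
  simp only [List.mem_filter, PySem.List.mem_pyRange_one, decide_eq_true_eq]
  constructor
  · rintro ⟨⟨h0, hlt⟩, hsl⟩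
    refine ⟨h0, by omega, ?_⟩
    have hi : i = ((i.toNat : Nat) : Int) := by omega
    rw [hi] at hsl
    rw [PySem.Chars.slice, PySem.List.slice_natCast_add] at hsl
    rw [List.prefix_iff_eq_take]
    nth_rewrite 1 [← hsl]
    rw [hsl]
  · rintro ⟨h0, hle, hpre⟩
    refine ⟨⟨h0, by omega⟩, ?_⟩
    have hi : i = ((i.toNat : Nat) : Int) := by omega
    rw [hi, PySem.Chars.slice, PySem.List.slice_natCast_add]
    exact (List.prefix_iff_eq_take.mp hpre).symm
    
lemma slbOcc_sorted (L S : List Char) : (slbOcc L S).Pairwise (· < ·) :=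
  (PySem.List.pairwise_lt_pyRange_one 0 _).filter _

-- head of a strictly sorted list containing a lower bound r
lemma head_getD_of_min {l : List Int} (r : Int) (hr : r ∈ l) (hmin : ∀ x ∈ l, r ≤ x)
    (hs : l.Pairwise (· < ·)) : l.head?.getD (-1) = r := by
  cases l with
  | nil => cases hr
  | cons h t =>
    simp only [List.head?_cons, Option.getD_some]
    rcases hr with _ | hr
    · rfl
    · next hr =>
      have h1 := hmin h (List.mem_cons_self)
      have h2 := (List.pairwise_cons.mp hs).1 r hr
      omega

-- findFrom from a natural position = first element of slbOcc that is ≥ k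
lemma findFrom_eq_head (L S : List Char) (k : Nat) (hk : k ≤ L.length) :
    PySem.Chars.findFrom L S (k : Int) none
      = ((slbOcc L S).filter (fun x => decide ((k : Int) ≤ x))).head?.getD (-1) := by
  by_cases hneg : PySem.Chars.findFrom L S (k : Int) none = -1
  · rw [hneg]
    have hnin := (PySem.Chars.findFrom_natCast_eq_neg_one_iff L S k hk).mp hneg
    have : (slbOcc L S).filter (fun x => decide ((k : Int) ≤ x)) = [] := by
      rw [List.filter_eq_nil_iff]
      intro x hx hkx
      simp only [decide_eq_true_eq] at hkx
      obtain ⟨h0, hle, hpre⟩ := mem_slbOcc.mp hx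
      apply hnin
      rw [← PySem.Chars.isIn_iff_infix, ← PySem.Chars.exists_prefix_drop_iff_isIn]
      refine ⟨x.toNat - k, ?_⟩
      rw [List.drop_drop, Nat.add_sub_cancel' (by omega : k ≤ x.toNat)]
      exact hpre
    rw [this]; rfl
  · set r := PySem.Chars.findFrom L S (k : Int) none with hrdef
    obtain ⟨hkr, hpre, hmin⟩ := PySem.Chars.findFrom_natCast_spec L S k hk hneg
    have hrlen : r ≤ L.length := by
      rw [hrdef, PySem.Chars.findFrom_natCast L S k hk]
      have := PySem.Chars.find_le_length (L.drop k) S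
      split
      · simp_all
      · simp_all; omega
    have hrtoNat : ((r.toNat : Nat) : Int) = r := by omega
    have hrmem : r ∈ slbOcc L S := by
      rw [mem_slbOcc]
      refine ⟨by omega, ?_, hpre⟩
      have := hpre.length_le
      simp only [List.length_drop] at this
      omega
    have hrfil : r ∈ (slbOcc L S).filter (fun x => decide ((k : Int) ≤ x)) := by
      rw [List.mem_filter]; exact ⟨hrmem, by simpa using hkr⟩
    refine Eq.symm (head_getD_of_min r hrfil ?_ ((slbOcc_sorted L S).filter _))
    intro x hx
    rw [List.mem_filter] at hx
    obtain ⟨hxo, hkx⟩ := hx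
    simp only [decide_eq_true_eq] at hkx
    obtain ⟨h0, hle, hpre'⟩ := mem_slbOcc.mp hxo
    rcases le_or_gt r x with hge | hlt
    · exact hge
    · exact absurd hpre' (hmin x.toNat (by omega) (by omega))

-- filter above the j-th element of a strictly sorted list = drop (j+1)
lemma filter_gt_getElem {l : List Int} (hs : l.Pairwise (· < ·)) (j : Nat) (hj : j < l.length) :
    l.filter (fun x => decide (l[j] < x)) = l.drop (j+1) := by
  induction l generalizing j with
  | nil => simp at hj
  | cons h t ih =>
    obtain ⟨hht, hts⟩ := List.pairwise_cons.mp hs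
    cases j with
    | zero =>
      simp only [List.getElem_cons_zero, List.filter_cons, decide_eq_true_eq]
      rw [if_neg (by omega), List.filter_eq_self.mpr (fun a ha => by simp [hht a ha])]
      simp
    | succ j =>
      simp only [List.getElem_cons_succ, List.filter_cons]
      have hjt : j < t.length := by simpa using hj
      have : ¬ (t[j] < h) := by
        have := hht t[j] (List.getElem_mem hjt); omega
      rw [if_neg (by simpa using this)]
      rw [show (h::t).drop (j+1+1) = t.drop (j+1) from rfl]
      exact ih hts j hjt


-- all elements of slbOcc are nonnegative and at most L.length - S.length
lemma slbOcc_bounds {L S : List Char} {x : Int} (hx : x ∈ slbOcc L S) :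
    0 ≤ x ∧ x + S.length ≤ L.length := by
  obtain ⟨h0, hle, _⟩ := mem_slbOcc.mp hx
  exact ⟨h0, hle⟩

-- the next occurrence after the j-th one
lemma findFrom_succ_eq (L S : List Char) (j : Nat) (hj : j < (slbOcc L S).length) :
    PySem.Chars.findFrom L S ((slbOcc L S)[j] + 1) none
      = ((slbOcc L S).drop (j+1)).head?.getD (-1) := by
  obtain ⟨h0, hle⟩ := slbOcc_bounds (List.getElem_mem hj)
  by_cases hcase : (slbOcc L S)[j] + 1 ≤ (L.length : Int)
  · have hk : (slbOcc L S)[j] + 1 = (((slbOcc L S)[j].toNat + 1 : Nat) : Int) := by omega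
    rw [hk, findFrom_eq_head L S _ (by omega)]
    congr 1
    rw [show ((slbOcc L S).filter (fun x => decide ((((slbOcc L S)[j].toNat + 1 : Nat) : Int) ≤ x)))
          = (slbOcc L S).filter (fun x => decide ((slbOcc L S)[j] < x)) from
        List.filter_congr (fun x _ => by rw [decide_eq_decide]; omega)]
    rw [filter_gt_getElem (slbOcc_sorted L S) j hj]
  · -- only possible when S = [] and (slbOcc L S)[j] = L.length; start is past the length
    have hstart : (L.length : Int) < (slbOcc L S)[j] + 1 := by omega
    have hdrop : (slbOcc L S).drop (j+1) = [] := by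
      rw [List.drop_eq_nil_iff]
      by_contra hlen
      have hjk : j + 1 < (slbOcc L S).length := by omega
      have hmono : (slbOcc L S)[j] < (slbOcc L S)[j+1] :=
        List.pairwise_iff_getElem.mp (slbOcc_sorted L S) j (j+1) hj hjk (by omega)
      have := (slbOcc_bounds (List.getElem_mem hjk)).2
      omega
    rw [hdrop]
    simp only [PySem.Chars.findFrom]
    rw [if_pos]
    · rfl
    · split <;> omega

-- the loop of A walks down the occurrence list
lemma slbLoopA_neg_one (L S : List Char) (f : Nat) : slbLoopA L S f (-1) = -1 := by
  cases f with
  | zero => rfl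
  | succ f => rw [slbLoopA, if_pos rfl]

lemma slbLoopA_getElem (L S : List Char) (f j : Nat) (hj : j < (slbOcc L S).length) :
    slbLoopA L S f (slbOcc L S)[j]
      = if h : j + f < (slbOcc L S).length then (slbOcc L S)[j + f] else -1 := by
  induction f generalizing j with
  | zero => simp [slbLoopA, hj]
  | succ f ih =>
    have h0 := (slbOcc_bounds (List.getElem_mem hj)).1
    rw [slbLoopA, if_neg (by omega), findFrom_succ_eq L S j hj]
    by_cases hjk : j + 1 < (slbOcc L S).length
    · rw [List.head?_drop, List.getElem?_eq_getElem hjk, Option.getD_some, ih (j+1) hjk]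
      by_cases hfin : j + 1 + f < (slbOcc L S).length
      · rw [dif_pos hfin, dif_pos (by omega)]
        congr 1; omega
      · rw [dif_neg hfin, dif_neg (by omega)]
    · rw [List.head?_drop, List.getElem?_eq_none (by omega), Option.getD_none,
        slbLoopA_neg_one, dif_neg (by omega)]


theorem split_line_before_eq (line : String) (nth : Int) (sep : String) :
    split_line_before line nth sep = split_line_before_alt line nth sep := by
  unfold split_line_before split_line_before_alt
  dsimp only
  set L := line.toList with hL
  set S := sep.toList with hS
  set occ := slbOcc L S with hocc
  set fuel := (nth - 1).toNat with hfuel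
  have hn : max nth 1 = (fuel : Int) + 1 := by omega
  have hp0 : PySem.Chars.findFrom L S 0 none = occ.head?.getD (-1) := by
    have h := findFrom_eq_head L S 0 (Nat.zero_le _)
    rw [Nat.cast_zero] at h
    rw [h, List.filter_eq_self.mpr (fun a ha => by simpa using (slbOcc_bounds ha).1)]
  rw [hn, hp0]
  rcases Nat.eq_zero_or_pos occ.length with hlen | hlen
  · have hnil : occ = [] := List.eq_nil_iff_length_eq_zero.mpr hlen
    rw [hnil]
    simp only [List.head?_nil, Option.getD_none, List.length_nil, Nat.cast_zero]
    rw [slbLoopA_neg_one, if_pos rfl, if_pos (by omega)]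
  · have hhead : occ.head?.getD (-1) = occ[0] := by
      have h1 : occ.head? = occ[0]? := by
        rw [← List.head?_drop (l := occ) (i := 0), List.drop_zero]
      rw [h1, List.getElem?_eq_getElem hlen, Option.getD_some]
    rw [hhead, slbLoopA_getElem L S fuel 0 hlen]
    simp only [Nat.zero_add]
    rw [← hocc]
    by_cases hf : fuel < occ.length
    · rw [dif_pos hf]
      have h0 := (slbOcc_bounds (List.getElem_mem hf)).1
      rw [if_neg (by omega), if_neg (by omega)]
      have : ((fuel : Int) + 1 - 1) = ((fuel : Nat) : Int) := by omega
      rw [this, PySem.List.pyGet?_natCast, List.getElem?_eq_getElem hf, Option.getD_some]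
    · rw [dif_neg hf, if_pos rfl, if_pos (by omega)]

-- ===== VERDICT (by name: the statement is the Claim_ definition above) =====
theorem split_line_before_spec : Claim_equal_split_line_before := by
  intro line nth sep _
  exact split_line_before_eq line nth sep
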